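-- pv_equiv track=rewrite | github.com/gabepen/ems_effect | src/scripts/analyze_rca_counts.py | align_counts_to_events
-- ===== SOURCE A (Python) =====
-- from typing import List, Tuple, Optional
--
-- def align_counts_to_events(counts_field: str, num_events: int, max_width: int = 4) -> Tuple[List[int], str]:
--     """
--     Align a digit string from counts_field to the number of ALT events.
--     - Keep only digits from counts_field
--     - If len == num_events * w for some w in [1..max_width], chunk by that width (prefer smallest w)
--     - If longer but not divisible, truncate to first num_events digits (w=1) as a fallback
--     - If shorter than num_events, return empty (unalignable)
--     Returns: (counts, mode) where mode is one of {'w1','w2','w3','w4','truncate','unalignable'}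
--     """
--     digits = ''.join(ch for ch in counts_field if ch.isdigit())
--     if num_events <= 0:
--         return [], 'unalignable'
--     for w in range(1, max_width + 1):
--         if len(digits) == num_events * w:
--             return [int(digits[j:j+w]) for j in range(0, len(digits), w)], f'w{w}'
--     # Fallbacks
--     if len(digits) > num_events:
--         return [int(d) for d in digits[:num_events]], 'truncate'
--     return [], 'unalignable'
-- ===== SOURCE B (Python) =====
-- def align_counts_to_events(counts_field: str, num_events: int, max_width: int = 4):
--     digits = ''.join(ch for ch in counts_field if ch.isdigit())
--     if num_events <= 0:
--         return [], 'unalignable'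
--     q, r = divmod(len(digits), num_events)
--     if r == 0 and 1 <= q <= max_width:
--         out = []
--         rest = digits
--         while rest:
--             out.append(int(rest[:q]))
--             rest = rest[q:]
--         return out, f'w{q}'
--     if len(digits) > num_events:
--         return [int(d) for d in digits[:num_events]], 'truncate'
--     return [], 'unalignable'
-- ===== Notes on version B (the rewrite author's own statement) =====
-- stated objective: simpler
-- what changed: The linear search over candidate widths w in range(1, max_width+1) is replaced by one divmod computing the unique valid width directly, and the chunking comprehension over index ranges is replaced by iterative slicing of a shrinking remainder string.
import Mathlib
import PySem

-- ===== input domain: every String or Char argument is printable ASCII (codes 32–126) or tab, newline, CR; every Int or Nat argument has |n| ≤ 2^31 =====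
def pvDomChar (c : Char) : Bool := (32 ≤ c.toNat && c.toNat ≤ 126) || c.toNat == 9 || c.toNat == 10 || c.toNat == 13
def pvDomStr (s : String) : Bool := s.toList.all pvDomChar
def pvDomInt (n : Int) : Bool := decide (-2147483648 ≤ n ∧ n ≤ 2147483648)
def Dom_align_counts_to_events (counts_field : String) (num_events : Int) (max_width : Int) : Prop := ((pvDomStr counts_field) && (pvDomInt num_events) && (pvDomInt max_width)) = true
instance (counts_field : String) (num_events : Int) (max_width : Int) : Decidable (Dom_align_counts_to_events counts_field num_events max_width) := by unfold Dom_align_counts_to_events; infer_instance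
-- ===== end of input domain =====

-- B replaces A's linear search over candidate widths by a single divmod computing the unique
-- valid width, and chunks by iteratively slicing a shrinking remainder (objective: simpler).

-- int(cs) for a nonempty all-digit chunk: exact there (ofChars? is some on such input)
def pvIntOf (cs : List Char) : Int := (PySem.Int.ofChars? cs).getD 0

-- ===== PORT A =====
-- [int(digits[j:j+w]) for j in range(0, len(digits), w)]
def pvChunkA (digits : List Char) (w : Int) : List Int :=
  (PySem.List.pyRange 0 (digits.length : Int) w).map
    (fun j => pvIntOf (PySem.List.slice digits (some j) (some (j + w))))

-- the 'for w in range(1, max_width+1)' search, returning at the first matching width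
def pvLoopA (digits : List Char) (n : Int) : List Int → Option (List Int × String)
  | [] => none
  | w :: rest =>
      if (digits.length : Int) = n * w then
        some (pvChunkA digits w, "w" ++ PySem.Int.toStr w)
      else pvLoopA digits n rest

def align_counts_to_events (counts_field : String) (num_events : Int) (max_width : Int) : List Int × String :=
  let digits := counts_field.toList.filter PySem.Chars.isdigit
  if num_events ≤ 0 then ([], "unalignable")
  else
    match pvLoopA digits num_events (PySem.List.pyRange 1 (max_width + 1) 1) with
    | some r => r
    | none =>
        if (digits.length : Int) > num_events then
          ((PySem.List.slice digits none (some num_events)).map (fun d => pvIntOf [d]), "truncate")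
        else ([], "unalignable")

-- ===== PORT B =====
-- 'while rest: out.append(int(rest[:q])); rest = rest[q:]' — the q = 0 disjunct only makes the
-- recursion total; B's Python reaches this loop only with q ≥ 1
def pvChunkB (rest : List Char) (q : Nat) : List Int :=
  if rest = [] ∨ q = 0 then []
  else pvIntOf (rest.take q) :: pvChunkB (rest.drop q) q
termination_by rest.length
decreasing_by
  rename_i h
  simp only [not_or] at h
  have h1 : rest ≠ [] := h.1
  have : 0 < rest.length := List.length_pos_iff.mpr h1
  simp only [List.length_drop]
  omega

def align_counts_to_events_alt (counts_field : String) (num_events : Int) (max_width : Int) : List Int × String :=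
  let digits := counts_field.toList.filter PySem.Chars.isdigit
  if num_events ≤ 0 then ([], "unalignable")
  else
    let q := PySem.Int.floordiv (digits.length : Int) num_events
    let r := PySem.Int.mod (digits.length : Int) num_events
    if r = 0 ∧ 1 ≤ q ∧ q ≤ max_width then
      (pvChunkB digits q.toNat, "w" ++ PySem.Int.toStr q)
    else if (digits.length : Int) > num_events then
      ((PySem.List.slice digits none (some num_events)).map (fun d => pvIntOf [d]), "truncate")
    else ([], "unalignable")

-- ===== PRECONDITION & SPEC =====
def Spec_align_counts_to_events (counts_field : String) (num_events : Int) (max_width : Int) (out : List Int × String) : Prop := out = align_counts_to_events_alt counts_field num_events max_width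
instance (counts_field : String) (num_events : Int) (max_width : Int) (out : List Int × String) : Decidable (Spec_align_counts_to_events counts_field num_events max_width out) := by unfold Spec_align_counts_to_events; infer_instance

-- ===== CLAIM (what is proved, stated in full; the proofs are below) =====
def Claim_equal_align_counts_to_events : Prop := ∀ (counts_field : String) (num_events : Int) (max_width : Int), Dom_align_counts_to_events counts_field num_events max_width → Spec_align_counts_to_events counts_field num_events max_width (align_counts_to_events counts_field num_events max_width)

-- ===== LEMMAS AND PROOFS =====

-- A's width search returns the chunking at q = len/n iff len % n = 0 and q is in the width list
theorem pvLoopA_char (d : List Char) (n : Int) (hn : 0 < n) (ws : List Int) :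
    pvLoopA d n ws =
      if (d.length : Int) % n = 0 ∧ (d.length : Int) / n ∈ ws then
        some (pvChunkA d ((d.length : Int) / n), "w" ++ PySem.Int.toStr ((d.length : Int) / n))
      else none := by
  induction ws with
  | nil => simp [pvLoopA]
  | cons w rest ih =>
    by_cases hw : (d.length : Int) = n * w
    · have hq : (d.length : Int) / n = w := by
        rw [hw]; exact Int.mul_ediv_cancel_left w (by omega)
      have hr : (d.length : Int) % n = 0 := by rw [hw]; exact Int.mul_emod_right n w
      have hmem : (d.length : Int) / n ∈ w :: rest := by rw [hq]; exact List.mem_cons_self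
      simp only [pvLoopA, if_pos hw]
      rw [if_pos ⟨hr, hmem⟩, hq]
    · have hne : ¬ ((d.length : Int) % n = 0 ∧ (d.length : Int) / n = w) := by
        rintro ⟨hr, hq⟩
        apply hw
        have h := Int.mul_ediv_add_emod (d.length : Int) n
        rw [hr, hq] at h
        omega
      simp only [pvLoopA, hw, if_false, ih, List.mem_cons]
      by_cases hr : (d.length : Int) % n = 0
      · have hiff : ((d.length : Int) / n = w ∨ (d.length : Int) / n ∈ rest) ↔ (d.length : Int) / n ∈ rest := by
          constructor
          · rintro (h | h)
            · exact absurd ⟨hr, h⟩ hne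
            · exact h
          · exact Or.inr
        simp [hr, hiff]
      · simp [hr]

-- the quotient counting the chunks of an exact multiple is the chunk count itself
theorem pvCeilCount (wn : Nat) (hw : 1 ≤ wn) (j : Nat) :
    (((wn * j : Nat) : Int) - 0 + (wn : Int) - 1) / (wn : Int) = j := by
  have h1 : ((wn * j : Nat) : Int) - 0 + (wn : Int) - 1 = ((wn : Int) - 1) + j * wn := by
    push_cast; ring
  rw [h1, Int.add_mul_ediv_right _ _ (by omega : (wn : Int) ≠ 0),
    Int.ediv_eq_zero_of_lt (by omega) (by omega)]
  simp

-- A's comprehension chunking as a map over chunk indices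
theorem pvChunkA_eq_map (wn m : Nat) (hw : 1 ≤ wn) (d : List Char) (hd : d.length = wn * m) :
    pvChunkA d (wn : Int) =
      (List.range m).map (fun k => pvIntOf ((d.drop (wn * k)).take wn)) := by
  unfold pvChunkA
  rw [PySem.List.pyRange_of_pos 0 (d.length : Int) (by exact_mod_cast hw)]
  have hcount : (if (0:Int) < (d.length : Int) then (((d.length : Int) - 0 + (wn : Int) - 1) / (wn : Int)).toNat else 0) = m := by
    rcases Nat.eq_zero_or_pos m with hm | hm
    · subst hm
      rw [if_neg (by simp [hd])]
    · have hpos : 0 < d.length := by rw [hd]; exact Nat.mul_pos (by omega) hm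
      rw [if_pos (by exact_mod_cast hpos), hd, pvCeilCount wn hw m]
      simp
  rw [hcount, List.map_map]
  apply List.map_congr_left
  intro k hk
  simp only [Function.comp_apply]
  congr 1
  rw [PySem.List.slice_toNat d (by positivity) (by positivity)]
  have e2 : ((0:Int) + (wn : Int) * (k : Nat) + (wn : Int)).toNat = wn * k + wn := by
    have h : ((0:Int) + (wn : Int) * (k : Nat) + (wn : Int)) = ((wn * k + wn : Nat) : Int) := by
      push_cast; ring
    rw [h, Int.toNat_natCast]
  have e1 : ((0:Int) + (wn : Int) * (k : Nat)).toNat = wn * k := by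
    have h : ((0:Int) + (wn : Int) * (k : Nat)) = ((wn * k : Nat) : Int) := by
      push_cast; ring
    rw [h, Int.toNat_natCast]
  rw [e2, e1]
  congr 1
  omega

-- B's remainder loop as the same map over chunk indices
theorem pvChunkB_eq_map (wn : Nat) (hw : 1 ≤ wn) (m : Nat) :
    ∀ d : List Char, d.length = wn * m →
      pvChunkB d wn = (List.range m).map (fun k => pvIntOf ((d.drop (wn * k)).take wn)) := by
  induction m with
  | zero =>
    intro d hd
    have hd' : d = [] := List.length_eq_zero_iff.mp (by omega)
    subst hd'
    rw [pvChunkB]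
    simp
  | succ m ih =>
    intro d hd
    have hdne : d ≠ [] := by
      intro h; subst h; simp at hd; omega
    rw [pvChunkB, if_neg (by simp [hdne]; omega), List.range_succ_eq_map]
    simp only [List.map_cons, List.map_map]
    congr 1
    have hrest : (d.drop wn).length = wn * m := by
      simp [List.length_drop, hd, Nat.mul_succ]
    rw [ih (d.drop wn) hrest]
    apply List.map_congr_left
    intro k hk
    simp only [Function.comp_apply, Nat.succ_eq_add_one]
    rw [List.drop_drop, show wn + wn * k = wn * (k + 1) by ring]

-- ===== VERDICT (by name: the statement is the Claim_ definition above) =====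
theorem align_counts_to_events_spec : Claim_equal_align_counts_to_events := by
  intro counts_field num_events max_width _
  unfold Spec_align_counts_to_events align_counts_to_events align_counts_to_events_alt
  by_cases hn : num_events ≤ 0
  · simp [hn]
  · have hn' : 0 < num_events := by omega
    simp only [if_neg hn]
    set digits := counts_field.toList.filter PySem.Chars.isdigit with hdig
    rw [PySem.Int.floordiv_eq_ediv_of_pos hn', PySem.Int.mod_eq_emod_of_pos hn',
      pvLoopA_char digits num_events hn']
    by_cases hcond : (digits.length : Int) % num_events = 0 ∧
        1 ≤ (digits.length : Int) / num_events ∧ (digits.length : Int) / num_events ≤ max_width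
    · have hq1 : 1 ≤ (digits.length : Int) / num_events := hcond.2.1
      have hmem : (digits.length : Int) / num_events ∈ PySem.List.pyRange 1 (max_width + 1) 1 := by
        rw [PySem.List.mem_pyRange_one]
        exact ⟨hq1, by omega⟩
      rw [if_pos ⟨hcond.1, hmem⟩, if_pos hcond]
      have hLq : (digits.length : Int) = num_events * ((digits.length : Int) / num_events) := by
        have h := Int.mul_ediv_add_emod (digits.length : Int) num_events
        rw [hcond.1] at h
        omega
      have hlen : digits.length = ((digits.length : Int) / num_events).toNat * num_events.toNat := by
        have h2 : ((((digits.length : Int) / num_events).toNat * num_events.toNat : Nat) : Int) = (digits.length : Int) := by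
          push_cast
          rw [Int.toNat_of_nonneg (by omega : (0:Int) ≤ (digits.length : Int) / num_events),
            Int.toNat_of_nonneg (le_of_lt hn'), mul_comm]
          exact hLq.symm
        exact_mod_cast h2.symm
      have hA := pvChunkA_eq_map (((digits.length : Int) / num_events).toNat) num_events.toNat
        (by omega) digits hlen
      have hB := pvChunkB_eq_map (((digits.length : Int) / num_events).toNat)
        (by omega) num_events.toNat digits hlen
      rw [Int.toNat_of_nonneg (by omega : (0:Int) ≤ (digits.length : Int) / num_events)] at hA
      rw [hA, hB]
    · rw [if_neg hcond]
      have hnot : ¬ ((digits.length : Int) % num_events = 0 ∧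
          (digits.length : Int) / num_events ∈ PySem.List.pyRange 1 (max_width + 1) 1) := by
        rw [PySem.List.mem_pyRange_one]
        rintro ⟨h1, h2, h3⟩
        exact hcond ⟨h1, h2, by omega⟩
      rw [if_neg hnot]
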